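-- pv_equiv track=rewrite | github.com/subashreevs/applied-algorithms | Assignments/Assignment2/ArrangePerformers.py | arrangePerformers
-- ===== SOURCE A (Python) =====
-- from collections import deque  # Import deque for efficient queue operations
--
-- def arrangePerformers(nums):
--     # Sort the numbers in descending order
--     nums.sort(reverse=True)
--     # Initialize an empty deque to store the arrangement
--     queue = deque()
--
--     # Iterate through each number in the sorted list
--     for i in nums:
--         # If the queue is not empty
--         if queue:
--             # Move the last element to the front
--             queue.appendleft(queue.pop())
--         # Add the current number to the front of the queue
--         queue.appendleft(i)
--
--     # Convert the deque back to a list and return it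
--     return list(queue)
-- ===== SOURCE B (Python) =====
-- from collections import deque
--
-- def arrangePerformers(nums):
--     # Sort in place descending (same in-place mutation as A).
--     nums.sort(reverse=True)
--     n = len(nums)
--     res = [0] * n
--     idx = deque(range(n))  # index queue: front = idx[0]
--     # Reveal simulation: assign values in ascending order into positions.
--     for v in reversed(nums):
--         p = idx.popleft()
--         res[p] = v
--         if idx:
--             idx.append(idx.popleft())
--     return res
-- ===== Notes on version B (the rewrite author's own statement) =====
-- stated objective: alternative
-- what changed: A builds the answer backwards by prepending each descending value to a deque after rotating its last element to the front; B runs the inverse 'reveal' simulation forwards, assigning the ascending values into slots popped from a rotating index queue of range(n).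
import Mathlib
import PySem

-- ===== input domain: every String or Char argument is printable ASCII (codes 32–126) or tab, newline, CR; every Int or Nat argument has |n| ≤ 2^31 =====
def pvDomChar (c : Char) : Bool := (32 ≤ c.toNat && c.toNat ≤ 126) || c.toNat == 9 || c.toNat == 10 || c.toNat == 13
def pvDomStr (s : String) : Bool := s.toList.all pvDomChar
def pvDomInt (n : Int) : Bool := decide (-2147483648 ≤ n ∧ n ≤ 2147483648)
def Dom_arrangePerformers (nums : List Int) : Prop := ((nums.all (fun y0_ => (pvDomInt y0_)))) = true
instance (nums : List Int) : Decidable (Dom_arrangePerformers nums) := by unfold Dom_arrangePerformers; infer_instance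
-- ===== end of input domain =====

-- B replaces A's backward deque-building of values by a forward "reveal" simulation that
-- assigns the ascending values into positions taken from a rotating index queue (alternative
-- decomposition, same cost).  Both A and B sort the argument list in place in Python; the
-- equivalence proved here is about the RETURN value (the ports take the list by value).

-- ===== PORT A =====
-- A: sort descending, then for each value move the queue's last element to the front and
-- prepend the value; 'queue' is a deque with its front at the list head.
def arrangePerformers (nums : List Int) : List Int :=
  let sortedNums := PySem.List.sorted nums id true
  sortedNums.foldl
    (fun queue i =>
      -- if queue: queue.appendleft(queue.pop())
      let queue := if queue.isEmpty then queue else queue.getLastD 0 :: queue.dropLast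
      -- queue.appendleft(i)
      i :: queue)
    []

-- ===== PORT B =====
-- B: sort descending, then reveal-simulate forward: pop an index from the front of the index
-- queue, store the next ascending value there, and rotate the index queue's front to its back.
def arrangePerformers_alt (nums : List Int) : List Int :=
  let s := PySem.List.sorted nums id true
  let n : Int := (s.length : Int)
  let res : List Int := List.replicate s.length 0
  let idx : List Int := PySem.List.pyRange 0 n 1
  (s.reverse.foldl
    (fun (st : List Int × List Int) v =>
      match PySem.List.pop? st.1 0 with
      | none => st       -- unreachable: the index queue holds exactly one slot per value
      | some (p, idx1) =>
          let res' := PySem.List.pySetD st.2 p v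
          let idx2 := if idx1.isEmpty then idx1 else
            match PySem.List.pop? idx1 0 with
            | none => idx1   -- unreachable: idx1 is non-empty here
            | some (q, rest) => rest ++ [q]
          (idx2, res'))
    (idx, res)).2

-- ===== PRECONDITION & SPEC =====
def Spec_arrangePerformers (nums : List Int) (out : List Int) : Prop := out = arrangePerformers_alt nums
instance (nums : List Int) (out : List Int) : Decidable (Spec_arrangePerformers nums out) := by unfold Spec_arrangePerformers; infer_instance

-- ===== CLAIM (what is proved, stated in full; the proofs are below) =====
def Claim_equal_arrangePerformers : Prop := ∀ (nums : List Int), Dom_arrangePerformers nums → Spec_arrangePerformers nums (arrangePerformers nums)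

-- ===== LEMMAS AND PROOFS =====

-- A's per-value step: move the last element to the front (rotate right).
def rotR (q : List Int) : List Int := if q.isEmpty then q else q.getLastD 0 :: q.dropLast
-- Move the front element to the back (rotate left).
def rotL (q : List Int) : List Int := match q with | [] => [] | x :: t => t ++ [x]

def aFold (s : List Int) : List Int := s.foldl (fun q i => i :: rotR q) []

-- The reveal order of a queue: output the front, rotate the rest left, repeat.
def vreveal (q : List Int) : List Int :=
  match q with
  | [] => []
  | x :: t => x :: vreveal (rotL t)
termination_by q.length
decreasing_by simp [rotL]; cases t <;> simp

theorem dropLast_getLastD (l : List Int) (hne : l ≠ []) : ∀ d : Int, l.dropLast ++ [l.getLastD d] = l := by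
  induction l with
  | nil => exact absurd rfl hne
  | cons a t ih =>
    intro d
    cases t with
    | nil => simp
    | cons b m =>
      have h2 := ih (by simp) a
      simpa [List.getLastD_cons] using congrArg (List.cons a) h2

theorem rotL_rotR (q : List Int) : rotL (rotR q) = q := by
  cases q with
  | nil => rfl
  | cons a t =>
    simp only [rotR, List.isEmpty_cons, Bool.false_eq_true, rotL]
    exact dropLast_getLastD (a :: t) (by simp) 0

theorem length_rotR (q : List Int) : (rotR q).length = q.length := by
  cases q with
  | nil => rfl
  | cons a t => simp [rotR]

theorem length_rotL (q : List Int) : (rotL q).length = q.length := by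
  cases q <;> simp [rotL]

theorem length_aFold_gen (s : List Int) : ∀ q : List Int, (s.foldl (fun q i => i :: rotR q) q).length = q.length + s.length := by
  induction s with
  | nil => simp
  | cons x t ih => intro q; simp [List.foldl_cons, ih, length_rotR]; omega

theorem length_aFold (s : List Int) : (aFold s).length = s.length := by
  simpa [aFold] using length_aFold_gen s []

theorem vreveal_aFold (s : List Int) : vreveal (aFold s) = s.reverse := by
  induction s using List.reverseRecOn with
  | nil => simp [aFold, vreveal]
  | append_singleton t x ih =>
    have h1 : aFold (t ++ [x]) = x :: rotR (aFold t) := by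
      simp [aFold, List.foldl_append]
    rw [h1, vreveal, rotL_rotR, ih]
    simp

theorem rotL_map (f : Int → Int) (q : List Int) : rotL (q.map f) = (rotL q).map f := by
  cases q <;> simp [rotL]

theorem vreveal_map (f : Int → Int) (q : List Int) : vreveal (q.map f) = (vreveal q).map f := by
  induction hn : q.length using Nat.strong_induction_on generalizing q with
  | _ n ih =>
    cases q with
    | nil => simp [vreveal]
    | cons x t =>
      have hn' : t.length + 1 = n := by simpa using hn
      rw [List.map_cons, vreveal, vreveal, rotL_map]
      have ht : (rotL t).length < n := by rw [length_rotL]; omega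
      rw [ih _ ht (rotL t) rfl]
      rfl

theorem vreveal_perm (q : List Int) : (vreveal q).Perm q := by
  induction hn : q.length using Nat.strong_induction_on generalizing q with
  | _ n ih =>
    cases q with
    | nil => simp [vreveal]
    | cons x t =>
      have hn' : t.length + 1 = n := by simpa using hn
      rw [vreveal]
      have ht : (rotL t).length < n := by rw [length_rotL]; omega
      refine List.Perm.cons x ((ih _ ht (rotL t) rfl).trans ?_)
      cases t with
      | nil => rfl
      | cons y u => simpa [rotL] using (List.perm_append_comm (l₁ := u) (l₂ := [y]))

-- B's foldl step.
def bStep (st : List Int × List Int) (v : Int) : List Int × List Int :=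
  match PySem.List.pop? st.1 0 with
  | none => st
  | some (p, idx1) =>
      let res' := PySem.List.pySetD st.2 p v
      let idx2 := if idx1.isEmpty then idx1 else
        match PySem.List.pop? idx1 0 with
        | none => idx1
        | some (q, rest) => rest ++ [q]
      (idx2, res')

theorem bStep_cons (p : Int) (t res : List Int) (v : Int) :
    bStep (p :: t, res) v = (rotL t, PySem.List.pySetD res p v) := by
  cases t with
  | nil => simp [bStep, PySem.List.pop?_zero_cons, rotL]
  | cons h tl => simp [bStep, PySem.List.pop?_zero_cons, rotL]

-- Consuming one value per index slot writes the values along the reveal order of the index queue.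
theorem bGo_eq_writes (vs : List Int) : ∀ (idx res : List Int), idx.length = vs.length →
    (vs.foldl bStep (idx, res)).2 =
      ((vreveal idx).zip vs).foldl (fun r pv => PySem.List.pySetD r pv.1 pv.2) res := by
  induction vs with
  | nil =>
    intro idx res h
    have : idx = [] := List.eq_nil_of_length_eq_zero h
    subst this
    simp [vreveal]
  | cons v vs ih =>
    intro idx res h
    cases idx with
    | nil => simp at h
    | cons p t =>
      rw [List.foldl_cons, bStep_cons, ih (rotL t) _ (by rw [length_rotL]; simpa using h)]
      rw [vreveal]
      simp

-- Writing f p at every position p of P: the result holds f i wherever i ∈ P, else the old entry.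
theorem writes_getElem? (f : Int → Int) (P : List Int) : ∀ (res : List Int),
    (∀ p ∈ P, 0 ≤ p ∧ p < (res.length : Int)) → ∀ i : Nat,
    (P.foldl (fun r p => PySem.List.pySetD r p (f p)) res)[i]? =
      if (i : Int) ∈ P then some (f i) else res[i]? := by
  induction P with
  | nil => intro res _ i; simp
  | cons p P ih =>
    intro res hb i
    obtain ⟨hp0, hpl⟩ := hb p (by simp)
    have hset : PySem.List.pySetD res p (f p) = res.set p.toNat (f p) :=
      PySem.List.pySetD_of_nonneg res (f p) hp0
    rw [List.foldl_cons, hset, ih (res.set p.toNat (f p))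
      (by intro q hq; simpa using hb q (List.mem_cons_of_mem _ hq)) i]
    by_cases hmem : (i : Int) ∈ P
    · simp [hmem]
    · by_cases hip : (i : Int) = p
      · have hmc : (i : Int) ∈ p :: P := by simp [hip]
        rw [if_neg hmem, if_pos hmc, ← hip]
        have hilen : i < res.length := by omega
        simp [hilen]
      · have hnc : ¬ ((i : Int) ∈ p :: P) := by simp [hip, hmem]
        simp only [hnc, if_false, hmem, List.getElem?_set]
        split
        · next hei => exact absurd (by omega : (i : Int) = p) hip
        · rfl

-- Core equality on the sorted list.
theorem core (s : List Int) :
    aFold s =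
      ((s.reverse.foldl bStep (PySem.List.pyRange 0 (s.length : Int) 1, List.replicate s.length 0)).2) := by
  set Q := aFold s with hQ
  have hQl : Q.length = s.length := length_aFold s
  set f : Int → Int := fun p => PySem.List.pyGetD Q p 0 with hf
  set R := PySem.List.pyRange 0 (s.length : Int) 1 with hR
  have hmapR : R.map f = Q := by
    rw [hR, hf, hQ, ← length_aFold s]
    exact PySem.List.map_pyGetD_pyRange_zero (aFold s) 0
  set P := vreveal R with hP
  have hPperm : P.Perm R := vreveal_perm R
  have hPmap : P.map f = s.reverse := by
    rw [hP, ← vreveal_map, hmapR, hQ]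
    exact vreveal_aFold s
  have hRlen : R.length = s.length := by
    simp [hR, PySem.List.length_pyRange_one]
  have hgo : (s.reverse.foldl bStep (R, List.replicate s.length 0)).2 =
      (P.zip s.reverse).foldl (fun r pv => PySem.List.pySetD r pv.1 pv.2) (List.replicate s.length 0) := by
    exact bGo_eq_writes s.reverse R _ (by simp [hRlen])
  have hzipgen : ∀ (l : List Int), l.zip (l.map f) = l.map (fun p => (p, f p)) := by
    intro l; induction l with
    | nil => rfl
    | cons a m ihm => simp [ihm]
  have hzip : P.zip s.reverse = P.map (fun p => (p, f p)) := by
    rw [← hPmap]; exact hzipgen P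
  have hfold : (P.zip s.reverse).foldl (fun r pv => PySem.List.pySetD r pv.1 pv.2) (List.replicate s.length 0) =
      P.foldl (fun r p => PySem.List.pySetD r p (f p)) (List.replicate s.length 0) := by
    rw [hzip, List.foldl_map]
  have hbound : ∀ p ∈ P, 0 ≤ p ∧ p < ((List.replicate s.length (0:Int)).length : Int) := by
    intro p hp
    have hpR : p ∈ R := hPperm.mem_iff.mp hp
    rw [hR, PySem.List.mem_pyRange_one] at hpR
    simpa using hpR
  rw [hgo, hfold]
  apply List.ext_getElem?
  intro i
  rw [writes_getElem? f P _ hbound i]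
  by_cases hi : i < s.length
  · have hiP : (i : Int) ∈ P := by
      rw [hPperm.mem_iff, hR, PySem.List.mem_pyRange_one]
      constructor <;> omega
    rw [if_pos hiP, hf]
    have h0 : (0 : Int) ≤ (i : Int) := by omega
    have h1 : (i : Int) < (Q.length : Int) := by omega
    rw [List.getElem?_eq_getElem (show i < Q.length by omega)]
    simp only [PySem.List.pyGetD_eq_getElem Q 0 h0 h1]
    simp
  · have hiP : ¬ ((i : Int) ∈ P) := by
      rw [hPperm.mem_iff, hR, PySem.List.mem_pyRange_one]
      intro hc
      omega
    rw [if_neg hiP, List.getElem?_eq_none (show Q.length ≤ i by omega),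
      List.getElem?_eq_none (by simpa using hi)]

-- ===== VERDICT (by name: the statement is the Claim_ definition above) =====
theorem arrangePerformers_spec : Claim_equal_arrangePerformers := by
  intro nums _
  unfold Spec_arrangePerformers arrangePerformers arrangePerformers_alt
  have h := core (PySem.List.sorted nums id true)
  simpa [aFold, rotR, bStep] using h
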